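-- pv_equiv track=rewrite | github.com/morening/LearnML | apriori/practice0310_mushroom.py | get_base_elements
-- ===== SOURCE A (Python) =====
-- def get_base_elements(datas):
--     base_elements = []
--     for data in datas:
--         for itr in data:
--             if [itr] not in base_elements:
--                 base_elements.append([itr])
--     base_elements.sort()
--     return base_elements
-- ===== SOURCE B (Python) =====
-- # sort-then-dedup-by-adjacency instead of A.s dedup-by-membership-then-sort (faster: one sort plus a linear pass)
-- def get_base_elements(datas):
--     # sort-then-dedup-by-adjacency instead of dedup-by-membership-then-sort
--     flat = sorted(x for row in datas for x in row)
--     result = []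
--     prev = None
--     for x in flat:
--         if prev is None or x != prev:
--             result.append([x])
--             prev = x
--     return result
-- ===== Notes on version B (the rewrite author's own statement) =====
-- stated objective: faster
-- what changed: Replaces A's dedup-by-membership scan over a growing list of singletons followed by a sort with: flatten, sort the raw ints once, then one linear pass keeping each element that differs from its predecessor.
import Mathlib
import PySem

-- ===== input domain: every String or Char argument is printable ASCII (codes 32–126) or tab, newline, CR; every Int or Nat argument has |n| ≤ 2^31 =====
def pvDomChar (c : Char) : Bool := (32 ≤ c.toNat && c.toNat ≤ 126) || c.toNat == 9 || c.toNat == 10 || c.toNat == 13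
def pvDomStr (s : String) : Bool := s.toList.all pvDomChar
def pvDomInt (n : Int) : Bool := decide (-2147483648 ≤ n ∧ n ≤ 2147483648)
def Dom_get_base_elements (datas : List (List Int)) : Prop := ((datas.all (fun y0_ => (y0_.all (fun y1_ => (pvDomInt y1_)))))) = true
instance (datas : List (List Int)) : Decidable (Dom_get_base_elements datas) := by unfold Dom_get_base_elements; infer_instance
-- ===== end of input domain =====

-- B replaces A's O(n*k) membership-scan dedup followed by a sort of singletons with
-- sort-the-flattened-ints-once-then-dedup-by-adjacency in one linear pass (objective: faster).

-- ===== PORT A =====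
def get_base_elements (datas : List (List Int)) : List (List Int) :=
  let base_elements :=
    datas.foldl (fun acc data =>
      data.foldl (fun acc itr =>
        if [itr] ∈ acc then acc else acc ++ [[itr]]) acc) []
  PySem.List.sorted base_elements (fun x => x) false

-- ===== PORT B =====
def get_base_elements_alt (datas : List (List Int)) : List (List Int) :=
  let flat := PySem.List.sorted (datas.foldl (fun acc row => acc ++ row) []) (fun x => x) false
  (flat.foldl (fun (st : List (List Int) × Option Int) x =>
      match st with
      | (result, prev) =>
        if prev = none ∨ some x ≠ prev then (result ++ [[x]], some x) else (result, prev)) ([], none)).1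

-- ===== PRECONDITION & SPEC =====
def Spec_get_base_elements (datas : List (List Int)) (out : List (List Int)) : Prop := out = get_base_elements_alt datas
instance (datas : List (List Int)) (out : List (List Int)) : Decidable (Spec_get_base_elements datas out) := by unfold Spec_get_base_elements; infer_instance

-- ===== CLAIM (what is proved, stated in full; the proofs are below) =====
def Claim_equal_get_base_elements : Prop := ∀ (datas : List (List Int)), Dom_get_base_elements datas → Spec_get_base_elements datas (get_base_elements datas)

-- ===== LEMMAS AND PROOFS =====

-- singleton wrapper used throughout
def pvSing (x : Int) : List Int := [x]

-- A's dedup step on raw ints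
def pvDD (s : List Int) (x : Int) : List Int := if x ∈ s then s else s ++ [x]

-- adjacency dedup of B's pass, parametrised by the previous element
def pvAdj : Option Int → List Int → List Int
  | _, [] => []
  | none, x :: t => x :: pvAdj (some x) t
  | some p, x :: t => if x = p then pvAdj (some p) t else x :: pvAdj (some x) t

lemma pv_sing_mem (y : Int) (s : List Int) : ([y] ∈ s.map pvSing) ↔ y ∈ s := by
  simp [pvSing]

lemma pv_A_inner (l s : List Int) :
    l.foldl (fun acc itr => if [itr] ∈ acc then acc else acc ++ [[itr]]) (s.map pvSing)
      = (l.foldl pvDD s).map pvSing := by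
  induction l generalizing s with
  | nil => rfl
  | cons x t ih =>
    simp only [List.foldl_cons]
    by_cases h : x ∈ s
    · rw [if_pos ((pv_sing_mem x s).2 h)]
      simp [pvDD, h, ih]
    · rw [if_neg (by simpa using (fun hh => h ((pv_sing_mem x s).1 hh)))]
      simpa [pvDD, h, pvSing] using ih (s ++ [x])

lemma pv_A_outer (datas : List (List Int)) (s : List Int) :
    datas.foldl (fun acc data =>
        data.foldl (fun acc itr => if [itr] ∈ acc then acc else acc ++ [[itr]]) acc) (s.map pvSing)
      = (datas.foldl (fun s row => row.foldl pvDD s) s).map pvSing := by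
  induction datas generalizing s with
  | nil => rfl
  | cons row rest ih =>
    simp only [List.foldl_cons]
    rw [pv_A_inner, ih]

lemma pv_dd_mem (l : List Int) (s : List Int) (y : Int) :
    y ∈ l.foldl pvDD s ↔ y ∈ s ∨ y ∈ l := by
  induction l generalizing s with
  | nil => simp
  | cons x t ih =>
    simp only [List.foldl_cons]
    by_cases h : x ∈ s
    · simp only [pvDD, if_pos h, ih]
      constructor
      · rintro (hy | hy)
        · exact Or.inl hy
        · exact Or.inr (List.mem_cons_of_mem _ hy)
      · rintro (hy | hy)
        · exact Or.inl hy
        · rcases List.mem_cons.1 hy with rfl | hy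
          · exact Or.inl h
          · exact Or.inr hy
    · simp only [pvDD, if_neg h, ih]
      simp only [List.mem_append, List.mem_cons]
      tauto

lemma pv_dd_nodup (l : List Int) (s : List Int) (h : s.Nodup) :
    (l.foldl pvDD s).Nodup := by
  induction l generalizing s with
  | nil => exact h
  | cons x t ih =>
    simp only [List.foldl_cons]
    by_cases hx : x ∈ s
    · simpa [pvDD, hx] using ih s h
    · refine ih _ ?_
      rw [pvDD, if_neg hx]
      exact h.append (List.nodup_singleton x)
        (fun a ha hax => hx (List.mem_singleton.1 hax ▸ ha))

lemma pv_D_mem (datas : List (List Int)) (s : List Int) (y : Int) :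
    y ∈ datas.foldl (fun s row => row.foldl pvDD s) s ↔ y ∈ s ∨ ∃ row ∈ datas, y ∈ row := by
  induction datas generalizing s with
  | nil => simp
  | cons row rest ih =>
    simp only [List.foldl_cons, ih, pv_dd_mem]
    simp only [List.mem_cons]
    constructor
    · rintro ((hy | hy) | ⟨r, hr, hy⟩)
      · exact Or.inl hy
      · exact Or.inr ⟨row, Or.inl rfl, hy⟩
      · exact Or.inr ⟨r, Or.inr hr, hy⟩
    · rintro (hy | ⟨r, (rfl | hr), hy⟩)
      · exact Or.inl (Or.inl hy)
      · exact Or.inl (Or.inr hy)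
      · exact Or.inr ⟨r, hr, hy⟩

lemma pv_D_nodup (datas : List (List Int)) (s : List Int) (h : s.Nodup) :
    (datas.foldl (fun s row => row.foldl pvDD s) s).Nodup := by
  induction datas generalizing s with
  | nil => exact h
  | cons row rest ih => exact ih _ (pv_dd_nodup row s h)

lemma pv_flat_mem (datas : List (List Int)) (s : List Int) (y : Int) :
    y ∈ datas.foldl (fun acc row => acc ++ row) s ↔ y ∈ s ∨ ∃ row ∈ datas, y ∈ row := by
  induction datas generalizing s with
  | nil => simp
  | cons row rest ih =>
    simp only [List.foldl_cons, ih, List.mem_append, List.mem_cons]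
    constructor
    · rintro ((hy | hy) | ⟨r, hr, hy⟩)
      · exact Or.inl hy
      · exact Or.inr ⟨row, Or.inl rfl, hy⟩
      · exact Or.inr ⟨r, Or.inr hr, hy⟩
    · rintro (hy | ⟨r, (rfl | hr), hy⟩)
      · exact Or.inl (Or.inl hy)
      · exact Or.inl (Or.inr hy)
      · exact Or.inr ⟨r, hr, hy⟩

lemma pv_adj_some (l : List Int) (p : Int) (hs : l.Pairwise (· ≤ ·)) (hp : ∀ y ∈ l, p ≤ y) :
    (∀ y, y ∈ pvAdj (some p) l ↔ y ∈ l ∧ p < y) ∧ (pvAdj (some p) l).Pairwise (· < ·) := by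
  induction l generalizing p with
  | nil => simp [pvAdj]
  | cons x t ih =>
    have hxt : ∀ y ∈ t, x ≤ y := fun y hy => List.rel_of_pairwise_cons hs hy
    have hst : t.Pairwise (· ≤ ·) := hs.of_cons
    have hpx : p ≤ x := hp x List.mem_cons_self
    by_cases hxp : x = p
    · subst hxp
      have := ih x hst hxt
      have hred : pvAdj (some x) (x :: t) = pvAdj (some x) t := by simp [pvAdj]
      rw [hred]
      refine ⟨fun y => ?_, this.2⟩
      rw [this.1 y]
      constructor
      · rintro ⟨hy, hlt⟩; exact ⟨List.mem_cons_of_mem _ hy, hlt⟩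
      · rintro ⟨hy, hlt⟩
        rcases List.mem_cons.1 hy with rfl | hy
        · exact absurd hlt (lt_irrefl _)
        · exact ⟨hy, hlt⟩
    · have hpltx : p < x := lt_of_le_of_ne hpx (fun h => hxp h.symm)
      have hx := ih x hst hxt
      simp only [pvAdj, if_neg hxp]
      constructor
      · intro y
        simp only [List.mem_cons, hx.1 y]
        constructor
        · rintro (rfl | ⟨hy, hlt⟩)
          · exact ⟨Or.inl rfl, hpltx⟩
          · exact ⟨Or.inr hy, lt_trans hpltx hlt⟩
        · rintro ⟨rfl | hy, hlt⟩
          · exact Or.inl rfl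
          · rcases lt_or_eq_of_le (hxt y hy) with hxy | rfl
            · exact Or.inr ⟨hy, hxy⟩
            · exact Or.inl rfl
      · refine List.pairwise_cons.2 ⟨fun z hz => ?_, hx.2⟩
        exact ((hx.1 z).1 hz).2

lemma pv_adj_none (l : List Int) (hs : l.Pairwise (· ≤ ·)) :
    (∀ y, y ∈ pvAdj none l ↔ y ∈ l) ∧ (pvAdj none l).Pairwise (· < ·) := by
  cases l with
  | nil => simp [pvAdj]
  | cons x t =>
    have hxt : ∀ y ∈ t, x ≤ y := fun y hy => List.rel_of_pairwise_cons hs hy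
    have hx := pv_adj_some t x hs.of_cons hxt
    simp only [pvAdj]
    constructor
    · intro y
      simp only [List.mem_cons, hx.1 y]
      constructor
      · rintro (rfl | ⟨hy, _⟩)
        · exact Or.inl rfl
        · exact Or.inr hy
      · rintro (rfl | hy)
        · exact Or.inl rfl
        · rcases lt_or_eq_of_le (hxt y hy) with hxy | rfl
          · exact Or.inr ⟨hy, hxy⟩
          · exact Or.inl rfl
    · refine List.pairwise_cons.2 ⟨fun z hz => ((hx.1 z).1 hz).2, hx.2⟩

lemma pv_B_fold (l : List Int) (res : List (List Int)) (prev : Option Int) :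
    (l.foldl (fun (st : List (List Int) × Option Int) x =>
        match st with
        | (result, prev) =>
          if prev = none ∨ some x ≠ prev then (result ++ [[x]], some x) else (result, prev))
      (res, prev)).1 = res ++ (pvAdj prev l).map pvSing := by
  induction l generalizing res prev with
  | nil => simp [pvAdj]
  | cons x t ih =>
    simp only [List.foldl_cons]
    cases prev with
    | none =>
      rw [if_pos (Or.inl rfl)]
      simp [pvAdj, ih, pvSing]
    | some p =>
      by_cases hxp : x = p
      · subst hxp
        rw [if_neg (by simp)]
        simp [pvAdj, ih]
      · rw [if_pos (Or.inr (by simpa using hxp))]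
        simp [pvAdj, hxp, ih, pvSing]

-- ===== VERDICT (by name: the statement is the Claim_ definition above) =====
theorem get_base_elements_spec : Claim_equal_get_base_elements := by
  intro datas _
  unfold Spec_get_base_elements get_base_elements get_base_elements_alt
  -- names
  set flat := datas.foldl (fun acc row => acc ++ row) [] with hflat
  set SL := PySem.List.sorted flat (fun x => x) false with hSL
  set D := datas.foldl (fun s row => row.foldl pvDD s) [] with hD
  -- A side: accumulator is map pvSing D
  have hA : datas.foldl (fun acc data =>
      data.foldl (fun acc itr => if [itr] ∈ acc then acc else acc ++ [[itr]]) acc) []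
      = D.map pvSing := by
    have := pv_A_outer datas []
    simpa [pvDD] using this
  -- B side: result is map pvSing (pvAdj none SL)
  have hB : (SL.foldl (fun (st : List (List Int) × Option Int) x =>
      match st with
      | (result, prev) =>
        if prev = none ∨ some x ≠ prev then (result ++ [[x]], some x) else (result, prev))
      ([], none)).1 = (pvAdj none SL).map pvSing := by
    simpa using pv_B_fold SL [] none
  rw [hA, hB]
  -- order facts
  have hSLsorted : SL.Pairwise (· ≤ ·) := by
    simpa using PySem.List.sorted_pairwise flat (fun x => x)
  have hadj := pv_adj_none SL hSLsorted
  have hmemSL : ∀ y, y ∈ SL ↔ y ∈ flat := by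
    intro y; rw [hSL]; exact PySem.List.mem_sorted flat (fun x : Int => x) false y
  have hmemD : ∀ y, y ∈ D ↔ y ∈ flat := by
    intro y
    rw [hD, pv_D_mem]
    rw [hflat, pv_flat_mem]
  have hnodupAdj : (pvAdj none SL).Nodup := hadj.2.imp ne_of_lt
  have hnodupD : D.Nodup := pv_D_nodup datas [] List.nodup_nil
  have hperm : (pvAdj none SL).Perm D := by
    refine (List.perm_ext_iff_of_nodup hnodupAdj hnodupD).2 ?_
    intro y
    simp only [hadj.1 y, hmemSL y, hmemD y]
  have hpermMap : ((pvAdj none SL).map pvSing).Perm (D.map pvSing) := hperm.map pvSing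
  have hpw : ((pvAdj none SL).map pvSing).Pairwise (fun a b => a < b) := by
    rw [List.pairwise_map]
    exact hadj.2.imp (fun {a b} h => by simp [pvSing, List.cons_lt_cons_iff, h])
  have hh := PySem.List.sorted_eq_of_perm_of_pairwise_lt (D.map pvSing)
      ((pvAdj none SL).map pvSing) (fun x => x) hpermMap hpw
  convert hh using 2
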